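-- pv_equiv track=rewrite | github.com/bibekmaharjan77/online-distributed-directories-under-predictions | fix_pred_frac_fix_num_nodes_var_err_rate.py | generate_type1_submeshes
-- ===== SOURCE A (Python) =====
-- import math, os, random
-- from collections import Counter, defaultdict
--
-- def xy_to_id_layout(x, y, size, layout=None):
--     """
--     If layout is None: row-major id = x*size + y (old behavior).
--     If layout is a list of length n: returns layout[x*size + y].
--     """
--     idx = x*size + y
--     if layout is None:
--         return idx
--     return layout[idx]
--
-- def generate_type1_submeshes(size, layout=None):
--     levels = int(math.log2(size)) + 1
--     hierarchy = defaultdict(list)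
--     for level in range(levels):
--         b = 2**level
--         for i in range(0, size, b):
--             for j in range(0, size, b):
--                 nodes = {
--                     xy_to_id_layout(x, y, size, layout)
--                     for x in range(i, min(i+b, size))
--                     for y in range(j, min(j+b, size))
--                 }
--                 hierarchy[(level,2)].append(nodes)
--     return hierarchy
-- ===== SOURCE B (Python) =====
-- import math
-- from collections import defaultdict
--
-- def generate_type1_submeshes(size, layout=None):
--     # One pass over the grid cells per level, bucketing each cell into its block
--     # by (x // b, y // b), instead of re-scanning the cells of every block.
--     levels = int(math.log2(size)) + 1
--     hierarchy = defaultdict(list)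
--     for level in range(levels):
--         b = 1 << level
--         buckets = {}
--         for x in range(size):
--             base = x * size
--             xb = x // b
--             for y in range(size):
--                 v = base + y if layout is None else layout[base + y]
--                 buckets.setdefault((xb, y // b), []).append(v)
--         hierarchy[(level, 2)] = [set(cells) for cells in buckets.values()]
--     return hierarchy
-- ===== Notes on version B (the rewrite author's own statement) =====
-- stated objective: alternative
-- what changed: Instead of re-scanning the cells of every block with three nested loops per level (block row, block column, cells of the block), B makes one row-major pass over all grid cells per level and groups them into blocks via a dict keyed by (x//b, y//b); the per-level block lists fall out of the buckets' insertion order.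
import Mathlib
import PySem

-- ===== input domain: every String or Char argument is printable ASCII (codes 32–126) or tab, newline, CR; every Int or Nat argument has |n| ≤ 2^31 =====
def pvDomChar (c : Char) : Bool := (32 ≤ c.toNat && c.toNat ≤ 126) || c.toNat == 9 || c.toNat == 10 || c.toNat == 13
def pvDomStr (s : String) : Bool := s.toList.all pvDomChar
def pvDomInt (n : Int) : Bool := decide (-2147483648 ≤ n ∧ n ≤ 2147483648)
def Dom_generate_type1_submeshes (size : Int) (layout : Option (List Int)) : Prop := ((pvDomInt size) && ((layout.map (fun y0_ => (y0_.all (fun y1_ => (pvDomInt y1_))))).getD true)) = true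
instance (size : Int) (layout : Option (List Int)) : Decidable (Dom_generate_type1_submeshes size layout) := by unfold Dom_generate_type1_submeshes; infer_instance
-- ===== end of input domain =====

-- ===== PORT A =====
-- B replaces A's per-block nested scans by a one-pass-per-level bucket grouping (alternative decomposition, same results).
-- A-side helper: xy_to_id_layout (layout[idx] ported as pyGetD; exact under Pre_, which keeps idx in range)
def xy_to_id_layout (x : Int) (y : Int) (size : Int) (layout : Option (List Int)) : Int :=
  let idx := x * size + y
  match layout with
  | none => idx
  | some l => PySem.List.pyGetD l idx 0

-- int(math.log2(size)) + 1 is ported as Nat.log2 size.toNat + 1 (exact on Pre_: 1 <= size <= 2^31, where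
-- float log2 truncates to floor(log2 size))
def generate_type1_submeshes (size : Int) (layout : Option (List Int)) : List (Int × Int × List (List Int)) :=
  let levels : Nat := Nat.log2 size.toNat + 1
  let hierarchy : PySem.Dict (Int × Int) (List (List Int)) :=
    (List.range levels).foldl (fun h (level : Nat) =>
      let b : Int := (2 : Int) ^ level
      (PySem.List.pyRange 0 size b).foldl (fun h i =>
        (PySem.List.pyRange 0 size b).foldl (fun h j =>
          let nodes : List Int := PySem.Set.ofList
            ((PySem.List.pyRange i (min (i + b) size) 1).flatMap (fun x =>
              (PySem.List.pyRange j (min (j + b) size) 1).map (fun y =>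
                xy_to_id_layout x y size layout)))
          h.modify ((level : Int), 2) [] (fun v => v ++ [nodes])) h) h)
      PySem.Dict.empty
  hierarchy.items.map (fun p => (p.1.1, p.1.2, p.2))

-- ===== PORT B =====
-- B-side helper: the conditional cell value `base + y if layout is None else layout[base + y]`
def pv_cell_value (layout : Option (List Int)) (idx : Int) : Int :=
  match layout with
  | none => idx
  | some l => PySem.List.pyGetD l idx 0

def generate_type1_submeshes_alt (size : Int) (layout : Option (List Int)) : List (Int × Int × List (List Int)) :=
  let levels : Nat := Nat.log2 size.toNat + 1  -- int(math.log2(size)) + 1, as in A (exact on Pre_)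
  let hierarchy : PySem.Dict (Int × Int) (List (List Int)) :=
    (List.range levels).foldl (fun h (level : Nat) =>
      let b : Int := (1 : Int) <<< level
      let buckets : PySem.Dict (Int × Int) (List Int) :=
        (PySem.List.pyRange 0 size 1).foldl (fun d x =>
          let base := x * size
          let xb := PySem.Int.floordiv x b
          (PySem.List.pyRange 0 size 1).foldl (fun d y =>
            let v : Int := pv_cell_value layout (base + y)
            d.modify (xb, PySem.Int.floordiv y b) [] (fun cells => cells ++ [v])) d) PySem.Dict.empty
      h.insert ((level : Int), 2) (buckets.values.map (fun cells => PySem.Set.ofList cells)))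
      PySem.Dict.empty
  hierarchy.items.map (fun p => (p.1.1, p.1.2, p.2))

-- ===== PRECONDITION & SPEC =====
-- Pre_ is exactly where the Python A returns: size >= 1 (math.log2 raises ValueError on size <= 0) and,
-- when a layout list is given, it covers all size*size cell indices (otherwise layout[idx] raises IndexError).
def Pre_generate_type1_submeshes (size : Int) (layout : Option (List Int)) : Prop :=
  1 ≤ size ∧ (layout.all (fun l => decide (size * size ≤ (l.length : Int)))) = true
instance (size : Int) (layout : Option (List Int)) : Decidable (Pre_generate_type1_submeshes size layout) := by
  unfold Pre_generate_type1_submeshes; infer_instance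
def pvWitness_generate_type1_submeshes : Int × Option (List Int) := (3, some [4, 1, 2, 2, 0, 5, 6, 7, 8])

def Spec_generate_type1_submeshes (size : Int) (layout : Option (List Int)) (out : List (Int × Int × List (List Int))) : Prop := out = generate_type1_submeshes_alt size layout
instance (size : Int) (layout : Option (List Int)) (out : List (Int × Int × List (List Int))) : Decidable (Spec_generate_type1_submeshes size layout out) := by unfold Spec_generate_type1_submeshes; infer_instance

-- ===== CLAIM (what is proved, stated in full; the proofs are below) =====
def Claim_equal_generate_type1_submeshes : Prop := ∀ (size : Int) (layout : Option (List Int)), Dom_generate_type1_submeshes size layout → Pre_generate_type1_submeshes size layout → Spec_generate_type1_submeshes size layout (generate_type1_submeshes size layout)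

-- ===== LEMMAS AND PROOFS =====

-- ---- proof-only definitions: the common per-level shape both ports are reduced to ----

-- number of blocks per dimension at block side b'
def pvM (n b' : Nat) : Nat := (n + b' - 1) / b'
-- size of block I along one dimension (clamped at the grid border)
def pvCs (n b' I : Nat) : Nat := min (I * b' + b') n - I * b'
-- the coordinates covered by block I along one dimension
def pvChunk (n b' I : Nat) : List Nat := List.range' (I * b') (pvCs n b' I)
-- the cell values of block (I, J), row-major
def pvCells (n b' : Nat) (g : Nat → Nat → Int) (I J : Nat) : List Int :=
  (pvChunk n b' I).flatMap (fun x => (pvChunk n b' J).map (fun y => g x y))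
-- the per-level list of blocks, in (row, column) block order
def pvBlocks (n b' : Nat) (g : Nat → Nat → Int) : List (List Int) :=
  (List.range (pvM n b')).flatMap (fun I =>
    (List.range (pvM n b')).map (fun J => PySem.Set.ofList (pvCells n b' g I J)))
-- the block keys in first-insertion order
def pvKT (m : Nat) : List (Int × Int) :=
  (List.range m).flatMap (fun (I : Nat) => (List.range m).map (fun (J : Nat) => ((I : Int), (J : Int))))
-- the (key, value) stream B's bucket loop feeds into the dict, row-major over cells
def pvCP (n b' : Nat) (g : Nat → Nat → Int) : List ((Int × Int) × Int) :=
  (List.range n).flatMap (fun x => (List.range n).map (fun y =>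
    ((((x / b' : Nat) : Int), ((y / b' : Nat) : Int)), g x y)))
-- the cell-value function both ports share
def pvG (size : Int) (layout : Option (List Int)) (x y : Nat) : Int :=
  xy_to_id_layout (x : Int) (y : Int) size layout

-- the two ports' level steps, verbatim
def pvStepA (size : Int) (layout : Option (List Int))
    (h : PySem.Dict (Int × Int) (List (List Int))) (level : Nat) : PySem.Dict (Int × Int) (List (List Int)) :=
  let b : Int := (2 : Int) ^ level
  (PySem.List.pyRange 0 size b).foldl (fun h i =>
    (PySem.List.pyRange 0 size b).foldl (fun h j =>
      let nodes : List Int := PySem.Set.ofList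
        ((PySem.List.pyRange i (min (i + b) size) 1).flatMap (fun x =>
          (PySem.List.pyRange j (min (j + b) size) 1).map (fun y =>
            xy_to_id_layout x y size layout)))
      h.modify ((level : Int), 2) [] (fun v => v ++ [nodes])) h) h

def pvStepB (size : Int) (layout : Option (List Int))
    (h : PySem.Dict (Int × Int) (List (List Int))) (level : Nat) : PySem.Dict (Int × Int) (List (List Int)) :=
  let b : Int := (1 : Int) <<< level
  let buckets : PySem.Dict (Int × Int) (List Int) :=
    (PySem.List.pyRange 0 size 1).foldl (fun d x =>
      let base := x * size
      let xb := PySem.Int.floordiv x b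
      (PySem.List.pyRange 0 size 1).foldl (fun d y =>
        let v : Int := pv_cell_value layout (base + y)
        d.modify (xb, PySem.Int.floordiv y b) [] (fun cells => cells ++ [v])) d) PySem.Dict.empty
  h.insert ((level : Int), 2) (buckets.values.map (fun cells => PySem.Set.ofList cells))

lemma pvPortA_eq (size : Int) (layout : Option (List Int)) :
    generate_type1_submeshes size layout =
      ((List.range (Nat.log2 size.toNat + 1)).foldl (pvStepA size layout) PySem.Dict.empty).items.map
        (fun p => (p.1.1, p.1.2, p.2)) := rfl

lemma pvPortB_eq (size : Int) (layout : Option (List Int)) :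
    generate_type1_submeshes_alt size layout =
      ((List.range (Nat.log2 size.toNat + 1)).foldl (pvStepB size layout) PySem.Dict.empty).items.map
        (fun p => (p.1.1, p.1.2, p.2)) := rfl

-- ---- arithmetic on blocks ----

lemma pvM_pos {n b' : Nat} (hn : 0 < n) (hb : 0 < b') : 0 < pvM n b' := by
  unfold pvM; exact Nat.div_pos (by omega) hb

lemma pvMul_lt {n b' I : Nat} (hb : 0 < b') (hI : I < pvM n b') : I * b' < n := by
  have h1 : I + 1 ≤ pvM n b' := hI
  have h2 : (I + 1) * b' ≤ n + b' - 1 := (Nat.le_div_iff_mul_le hb).mp h1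
  have h3 : (I + 1) * b' = I * b' + b' := by ring
  omega

lemma pvCs_pos {n b' I : Nat} (hb : 0 < b') (hI : I < pvM n b') : 1 ≤ pvCs n b' I := by
  have := pvMul_lt hb hI
  unfold pvCs; omega

lemma pvChunk_mem {n b' I x : Nat} (hx : x ∈ pvChunk n b' I) :
    I * b' ≤ x ∧ x < min (I * b' + b') n := by
  unfold pvChunk pvCs at hx
  rw [List.mem_range'_1] at hx
  omega

lemma pvDiv_chunk {n b' I x : Nat} (hb : 0 < b') (hx : x ∈ pvChunk n b' I) : x / b' = I := by
  have h := pvChunk_mem hx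
  have h3 : (I + 1) * b' = I * b' + b' := by ring
  exact Nat.div_eq_of_lt_le (by omega) (by omega)

lemma pvFlatMap_congr {α β : Type*} {l : List α} {f g : α → List β}
    (h : ∀ a ∈ l, f a = g a) : l.flatMap f = l.flatMap g := by
  simp only [List.flatMap_def]
  exact congrArg List.flatten (List.map_congr_left h)

-- the grid rows split into the block rows, in order
lemma pvCover {b' : Nat} (hb : 0 < b') : ∀ n, List.range n = (List.range (pvM n b')).flatMap (pvChunk n b') := by
  intro n
  induction n with
  | zero =>
    have h0 : pvM 0 b' = 0 := Nat.div_eq_of_lt (by omega)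
    simp [h0]
  | succ n ih =>
    obtain ⟨q, r, hqr, hrb⟩ : ∃ q r, q * b' + r = n ∧ r < b' :=
      ⟨n / b', n % b', by rw [Nat.mul_comm]; exact Nat.div_add_mod n b', Nat.mod_lt n hb⟩
    have e1 : (q + 1) * b' = q * b' + b' := by ring
    have e2 : (q + 1 + 1) * b' = q * b' + 2 * b' := by ring
    have hm1 : pvM (n + 1) b' = q + 1 := by
      unfold pvM
      exact Nat.div_eq_of_lt_le (by omega) (by omega)
    have hchunkeq : ∀ I, I < q → pvChunk (n + 1) b' I = pvChunk n b' I := by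
      intro I hI
      have f1 : (I + 1) * b' ≤ q * b' := Nat.mul_le_mul_right _ (by omega)
      have f2 : (I + 1) * b' = I * b' + b' := by ring
      unfold pvChunk pvCs
      congr 1
      omega
    have hcongr : (List.range q).flatMap (pvChunk (n + 1) b') = (List.range q).flatMap (pvChunk n b') :=
      pvFlatMap_congr (fun I hI => hchunkeq I (List.mem_range.mp hI))
    by_cases hr0 : r = 0
    · have hm0 : pvM n b' = q := by
        unfold pvM
        exact Nat.div_eq_of_lt_le (by omega) (by omega)
      have hlast : pvChunk (n + 1) b' q = [n] := by
        unfold pvChunk pvCs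
        have hcs : min (q * b' + b') (n + 1) - q * b' = 1 := by omega
        rw [hcs, List.range'_one]
        congr 1
        omega
      rw [hm1, List.range_succ, List.range_succ, List.flatMap_append, hcongr, List.flatMap_cons,
        List.flatMap_nil, hlast, ih, hm0, List.append_nil]
    · have hm0 : pvM n b' = q + 1 := by
        unfold pvM
        exact Nat.div_eq_of_lt_le (by omega) (by omega)
      have hlast : pvChunk (n + 1) b' q = pvChunk n b' q ++ [n] := by
        unfold pvChunk pvCs
        have hcs1 : min (q * b' + b') (n + 1) - q * b' = (min (q * b' + b') n - q * b') + 1 := by omega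
        rw [hcs1, List.range'_concat]
        have hv : q * b' + 1 * (min (q * b' + b') n - q * b') = n := by omega
        rw [hv]
      rw [hm1, List.range_succ, List.range_succ, List.flatMap_append, hcongr, List.flatMap_cons,
        List.flatMap_nil, hlast, ih, hm0, List.range_succ, List.flatMap_append, List.flatMap_cons,
        List.flatMap_nil]
      simp [List.append_assoc]

-- ---- pyRange bridges ----

lemma pvPyRange_one (p q : Nat) :
    PySem.List.pyRange (p : Int) (q : Int) 1 = (List.range' p (q - p)).map (fun (t : Nat) => (t : Int)) := by
  rw [PySem.List.pyRange_of_pos _ _ (by norm_num : (0 : Int) < 1)]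
  rcases Nat.lt_or_ge q p with h | h
  · have h1 : ¬ ((p : Int) < (q : Int)) := by exact_mod_cast not_lt.mpr (Nat.le_of_lt h)
    have h2 : q - p = 0 := by omega
    simp [h1, h2]
  · rcases Nat.eq_or_lt_of_le h with rfl | h
    · have h1 : ¬ ((p : Int) < (p : Int)) := lt_irrefl _
      have h2 : p - p = 0 := by omega
      simp [h1, h2]
    · have h1 : ((p : Int) < (q : Int)) := by exact_mod_cast h
      have h2 : (((q : Int) - (p : Int) + 1 - 1) / 1).toNat = q - p := by
        rw [Int.ediv_one]; omega
      rw [if_pos h1, h2, List.range'_eq_map_range, List.map_map]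
      apply List.map_congr_left
      intro k hk
      simp only [Function.comp]
      push_cast
      ring

lemma pvPyRange_step {b' : Nat} (hb : 0 < b') (n : Nat) :
    PySem.List.pyRange 0 (n : Int) (b' : Int) = (List.range (pvM n b')).map (fun I => ((I * b' : Nat) : Int)) := by
  have hb' : (0 : Int) < (b' : Int) := by exact_mod_cast hb
  rw [PySem.List.pyRange_of_pos _ _ hb']
  rcases Nat.eq_zero_or_pos n with rfl | h
  · have h2 : pvM 0 b' = 0 := by unfold pvM; exact Nat.div_eq_of_lt (by omega)
    simp [h2]
  · have h1 : ((0 : Int) < (n : Int)) := by exact_mod_cast h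
    have h2 : (((n : Int) - 0 + (b' : Int) - 1) / (b' : Int)).toNat = pvM n b' := by
      have h3 : ((n : Int) - 0 + (b' : Int) - 1) = ((n + b' - 1 : Nat) : Int) := by push_cast; omega
      rw [h3, ← Int.natCast_ediv, Int.toNat_natCast]
      rfl
    rw [if_pos h1, h2]
    apply List.map_congr_left
    intro k hk
    push_cast
    ring

-- ---- Set.update toolkit ----

lemma pvUpdate_absorb {α : Type} [BEq α] [LawfulBEq α] {l : List α} :
    ∀ {s : PySem.Set α}, (∀ a ∈ l, a ∈ s) → s.update l = s := by
  induction l with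
  | nil => intro s _; rfl
  | cons a l ih =>
    intro s h
    have h1 : s.update (a :: l) = (s.add a).update l := by simp [PySem.Set.update]
    rw [h1, PySem.Set.add_of_mem (h a (List.mem_cons_self ..))]
    exact ih (fun x hx => h x (List.mem_cons_of_mem _ hx))

lemma pvUpdate_replicate {α : Type} [BEq α] [LawfulBEq α] {s : PySem.Set α} {k : α} {c : Nat}
    (hc : 1 ≤ c) (hk : k ∉ s) : s.update (List.replicate c k) = s ++ [k] := by
  obtain ⟨c', rfl⟩ : ∃ c', c = c' + 1 := ⟨c - 1, by omega⟩
  rw [List.replicate_succ]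
  have h1 : s.update (k :: List.replicate c' k) = (s.add k).update (List.replicate c' k) := by
    simp [PySem.Set.update]
  rw [h1, PySem.Set.add_of_not_mem hk]
  exact pvUpdate_absorb (fun a ha => by
    rw [List.eq_of_mem_replicate ha]; exact List.mem_append_right _ (List.mem_singleton_self k))

lemma pvUpdate_runs {α : Type} [BEq α] [LawfulBEq α] :
    ∀ (ks : List (α × Nat)) (s : PySem.Set α), (∀ p ∈ ks, 1 ≤ p.2) → (ks.map Prod.fst).Nodup →
      (∀ p ∈ ks, p.1 ∉ s) →
      s.update (ks.flatMap (fun p => List.replicate p.2 p.1)) = s ++ ks.map Prod.fst := by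
  intro ks
  induction ks with
  | nil => intro s _ _ _; simp
  | cons p ks ih =>
    intro s hc hnd hfr
    rw [List.flatMap_cons, PySem.Set.update_append,
      pvUpdate_replicate (hc p (List.mem_cons_self ..)) (hfr p (List.mem_cons_self ..))]
    rw [List.map_cons] at hnd ⊢
    have hh := List.nodup_cons.mp hnd
    rw [ih (s ++ [p.1]) (fun q hq => hc q (List.mem_cons_of_mem _ hq)) hh.2 ?_]
    · simp
    · intro q hq hmem
      rcases List.mem_append.mp hmem with h | h
      · exact hfr q (List.mem_cons_of_mem _ hq) h
      · exact hh.1 (by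
          rw [List.mem_singleton] at h
          rw [← h]
          exact List.mem_map_of_mem hq)

lemma pvUpdate_flatten_rep {α : Type} [BEq α] [LawfulBEq α] {s : PySem.Set α} {r : List α} :
    ∀ {c : Nat}, 1 ≤ c → s.update ((List.replicate c r).flatten) = s.update r := by
  intro c hc
  obtain ⟨c', rfl⟩ : ∃ c', c = c' + 1 := ⟨c - 1, by omega⟩
  rw [List.replicate_succ, List.flatten_cons, PySem.Set.update_append]
  apply pvUpdate_absorb
  intro a ha
  obtain ⟨l, hl, hal⟩ := List.mem_flatten.mp ha
  rw [List.eq_of_mem_replicate hl] at hal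
  exact (PySem.Set.mem_update _ _ _).mpr (Or.inr hal)

lemma pvFlatMap_const {α β : Type*} (l : List β) (r : List α) :
    l.flatMap (fun _ => r) = (List.replicate l.length r).flatten := by
  induction l with
  | nil => rfl
  | cons a l ih => simp [List.flatMap_cons, ih, List.replicate_succ]

lemma pvFlatMap_single {β : Type*} :
    ∀ (l : List Nat), l.Nodup → ∀ {J : Nat}, J ∈ l → ∀ (h : Nat → List β),
      (∀ x ∈ l, x ≠ J → h x = []) → l.flatMap h = h J := by
  intro l
  induction l with
  | nil => intro _ _ hJ; cases hJ
  | cons a l ih =>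
    intro hnd J hJ h hz
    have hh := List.nodup_cons.mp hnd
    rw [List.flatMap_cons]
    by_cases haJ : a = J
    · subst haJ
      have : l.flatMap h = [] := by
        rw [pvFlatMap_congr (g := fun _ => ([] : List β))
          (fun x hx => hz x (List.mem_cons_of_mem _ hx) (fun hxa => hh.1 (hxa ▸ hx)))]
        simp
      rw [this, List.append_nil]
    · rw [hz a (List.mem_cons_self ..) haJ, List.nil_append]
      exact ih hh.2 ((List.mem_cons.mp hJ).resolve_left (fun hh' => haJ hh'.symm)) h
        (fun x hx => hz x (List.mem_cons_of_mem _ hx))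

-- ---- the key list and the value lists of B's bucket dict ----

lemma pvRow_eq {n b' : Nat} (hb : 0 < b') (I : Nat) :
    (List.range n).map (fun y => (((I : Int), ((y / b' : Nat) : Int)) : Int × Int)) =
      (List.range (pvM n b')).flatMap (fun J => List.replicate (pvCs n b' J) ((I : Int), (J : Int))) := by
  rw [pvCover hb n, List.map_flatMap]
  apply pvFlatMap_congr
  intro J hJ
  rw [List.map_congr_left (fun y hy => by rw [pvDiv_chunk hb hy] :
    ∀ y ∈ pvChunk n b' J, (((I : Int), ((y / b' : Nat) : Int)) : Int × Int) = ((I : Int), (J : Int))),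
    List.map_const']
  congr 1
  unfold pvChunk
  exact List.length_range'

-- processing the rows of the grid block-row by block-row: each block row first appends its m block
-- keys in column order, then later rows of the same block row add nothing new
lemma pvKeys_outer {n b' : Nat} (hb : 0 < b') :
    ∀ (Is : List Nat) (s : PySem.Set (Int × Int)),
      (∀ I ∈ Is, I < pvM n b') → Is.Nodup →
      (∀ I ∈ Is, ∀ p ∈ s, p.1 ≠ (I : Int)) →
      s.update (Is.flatMap (fun I => (pvChunk n b' I).flatMap (fun _ =>
          (List.range (pvM n b')).flatMap (fun J => List.replicate (pvCs n b' J) ((I : Int), (J : Int)))))) =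
        s ++ Is.flatMap (fun (I : Nat) => (List.range (pvM n b')).map (fun (J : Nat) => (((I : Int), (J : Int)) : Int × Int))) := by
  intro Is
  induction Is with
  | nil => intro s _ _ _; simp
  | cons I Is ih =>
    intro s hlt hnd hfr
    have hh := List.nodup_cons.mp hnd
    have hIm : I < pvM n b' := hlt I (List.mem_cons_self ..)
    rw [List.flatMap_cons, PySem.Set.update_append, pvFlatMap_const, pvUpdate_flatten_rep
      (by unfold pvChunk; rw [List.length_range']; exact pvCs_pos hb hIm)]
    have hks : ((List.range (pvM n b')).map (fun (J : Nat) =>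
        (((((I : Int), (J : Int))) : Int × Int), pvCs n b' J))).flatMap
          (fun p => List.replicate p.2 p.1) =
        (List.range (pvM n b')).flatMap (fun J => List.replicate (pvCs n b' J) ((I : Int), (J : Int))) := by
      rw [List.flatMap_map]
    rw [← hks, pvUpdate_runs _ s ?hc ?hnd2 ?hfr2]
    case hc =>
      intro p hp
      obtain ⟨J, hJ, rfl⟩ := List.mem_map.mp hp
      exact pvCs_pos hb (List.mem_range.mp hJ)
    case hnd2 =>
      rw [List.map_map]
      refine List.Nodup.map ?_ List.nodup_range
      intro a b hab
      simpa using hab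
    case hfr2 =>
      intro p hp hmem
      obtain ⟨J, hJ, rfl⟩ := List.mem_map.mp hp
      exact hfr I (List.mem_cons_self ..) _ hmem rfl
    rw [List.map_map]
    have hmapfst : (List.map ((fun p => p.1) ∘ fun (J : Nat) =>
        (((((I : Int), (J : Int))) : Int × Int), pvCs n b' J)) (List.range (pvM n b'))) =
        (List.range (pvM n b')).map (fun (J : Nat) => (((I : Int), (J : Int)) : Int × Int)) := rfl
    rw [hmapfst, ih (s ++ _) (fun I' hI' => hlt I' (List.mem_cons_of_mem _ hI')) hh.2 ?_,
      List.flatMap_cons, List.append_assoc]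
    intro I' hI' p hp
    rcases List.mem_append.mp hp with h | h
    · exact hfr I' (List.mem_cons_of_mem _ hI') p h
    · obtain ⟨J, hJ, rfl⟩ := List.mem_map.mp h
      have : I ≠ I' := fun hc => hh.1 (hc ▸ hI')
      simpa using fun hc => this (by exact_mod_cast hc)

lemma pvKeys {n b' : Nat} (hb : 0 < b') :
    PySem.Set.ofList ((List.range n).flatMap (fun x => (List.range n).map (fun y =>
        ((((x / b' : Nat) : Int), ((y / b' : Nat) : Int)) : Int × Int)))) = pvKT (pvM n b') := by
  rw [← PySem.Set.update_nil_left,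
    pvFlatMap_congr (fun x _ => pvRow_eq (n := n) hb (x / b')),
    pvCover hb n, List.flatMap_assoc,
    pvFlatMap_congr (fun I hI => pvFlatMap_congr (fun x hx => by rw [pvDiv_chunk hb hx])),
    pvKeys_outer hb (List.range (pvM n b')) [] (fun I hI => List.mem_range.mp hI)
      List.nodup_range (fun _ _ p hp => absurd hp (List.not_mem_nil)),
    List.nil_append]
  rfl

lemma pvVals {n b' I J : Nat} (hb : 0 < b') (hI : I < pvM n b') (hJ : J < pvM n b')
    (g : Nat → Nat → Int) :
    ((pvCP n b' g).filter (fun p => p.1 == (((I : Int), (J : Int)) : Int × Int))).map Prod.snd =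
      pvCells n b' g I J := by
  unfold pvCP
  rw [List.filter_flatMap, List.map_flatMap]
  have hxpiece : ∀ x ∈ List.range n,
      (((List.range n).map (fun y => (((((x / b' : Nat) : Int), ((y / b' : Nat) : Int)) : Int × Int),
        g x y))).filter (fun p => p.1 == (((I : Int), (J : Int)) : Int × Int))).map Prod.snd =
      if x / b' = I then (pvChunk n b' J).map (fun y => g x y) else [] := by
    intro x _
    rw [pvCover hb n, List.map_flatMap, List.filter_flatMap, List.map_flatMap]
    by_cases hxI : x / b' = I
    · rw [if_pos hxI]
      rw [pvFlatMap_single (List.range (pvM n b')) List.nodup_range (List.mem_range.mpr hJ) _ ?hz]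
      case hz =>
        intro J' hJ' hne
        rw [List.filter_eq_nil_iff.mpr, List.map_nil]
        intro p hp
        obtain ⟨y, hy, rfl⟩ := List.mem_map.mp hp
        rw [pvDiv_chunk hb hy]
        simp only [beq_iff_eq, Prod.mk.injEq]
        rintro ⟨-, h2⟩
        exact hne (by exact_mod_cast h2)
      rw [List.filter_eq_self.mpr, List.map_map]
      · apply List.map_congr_left
        intro y hy
        rfl
      · intro p hp
        obtain ⟨y, hy, rfl⟩ := List.mem_map.mp hp
        rw [pvDiv_chunk hb hy, hxI]
        simp
    · rw [if_neg hxI]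
      rw [pvFlatMap_congr (g := fun _ => ([] : List Int)) (fun J' hJ' => by
        rw [List.filter_eq_nil_iff.mpr, List.map_nil]
        intro p hp
        obtain ⟨y, hy, rfl⟩ := List.mem_map.mp hp
        simp only [beq_iff_eq, Prod.mk.injEq]
        rintro ⟨h1, -⟩
        exact hxI (by exact_mod_cast h1))]
      simp
  rw [pvFlatMap_congr hxpiece, pvCover hb n, List.flatMap_assoc]
  rw [pvFlatMap_single (List.range (pvM n b')) List.nodup_range (List.mem_range.mpr hI) _ ?hz2]
  case hz2 =>
    intro I' hI' hne
    rw [pvFlatMap_congr (g := fun _ => ([] : List Int)) (fun x hx => by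
      rw [if_neg (fun hc => hne (by rw [← hc, pvDiv_chunk hb hx]))])]
    simp
  unfold pvCells
  apply pvFlatMap_congr
  intro x hx
  rw [if_pos (pvDiv_chunk hb hx)]

lemma pvB_buckets {n b' : Nat} (hb : 0 < b') (g : Nat → Nat → Int) :
    (((pvCP n b' g).foldl (fun d p => d.modify p.1 [] (fun cells => cells ++ [p.2]))
        (PySem.Dict.empty : PySem.Dict (Int × Int) (List Int))).values).map
      (fun cells => PySem.Set.ofList cells) = pvBlocks n b' g := by
  have hmapfst : (pvCP n b' g).map (fun p => p.1) =
      (List.range n).flatMap (fun x => (List.range n).map (fun y =>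
        ((((x / b' : Nat) : Int), ((y / b' : Nat) : Int)) : Int × Int))) := by
    unfold pvCP
    rw [List.map_flatMap]
    apply pvFlatMap_congr
    intro x _
    rw [List.map_map]
    rfl
  have hkeys : ((pvCP n b' g).foldl (fun d p => d.modify p.1 [] (fun cells => cells ++ [p.2]))
      (PySem.Dict.empty : PySem.Dict (Int × Int) (List Int))).keys = pvKT (pvM n b') := by
    rw [PySem.Dict.keys_foldl_modify_key (pvCP n b' g) (fun p => p.1) []
      (fun _ p => (fun cells => cells ++ [p.2])) PySem.Dict.empty,
      PySem.Dict.keys_empty, PySem.Set.update_nil_left, hmapfst, pvKeys hb]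
  have hnodup : ((pvCP n b' g).foldl (fun d p => d.modify p.1 [] (fun cells => cells ++ [p.2]))
      (PySem.Dict.empty : PySem.Dict (Int × Int) (List Int))).keys.Nodup :=
    PySem.Dict.nodup_keys_foldl_modify_key (pvCP n b' g) (fun p => p.1) []
      (fun _ p => (fun cells => cells ++ [p.2])) PySem.Dict.empty PySem.Dict.nodup_keys_empty
  rw [PySem.Dict.values_eq_map_keys _ hnodup [], hkeys, List.map_map]
  unfold pvKT pvBlocks
  rw [List.map_flatMap]
  apply pvFlatMap_congr
  intro I hI
  rw [List.map_map]
  apply List.map_congr_left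
  intro J hJ
  show PySem.Set.ofList ((((pvCP n b' g).foldl (fun d p => d.modify p.1 [] (fun cells => cells ++ [p.2]))
      (PySem.Dict.empty : PySem.Dict (Int × Int) (List Int)))).getD ((I : Int), (J : Int)) []) =
    PySem.Set.ofList (pvCells n b' g I J)
  rw [PySem.Dict.getD_foldl_modify_append (pvCP n b' g) PySem.Dict.empty,
    PySem.Dict.getD_empty, List.nil_append,
    pvVals hb (List.mem_range.mp hI) (List.mem_range.mp hJ) g]

-- ---- per-level reductions of the two ports ----

lemma pvA_level {size : Int} (layout : Option (List Int)) (hsz : 1 ≤ size) (level : Nat) :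
    (PySem.List.pyRange 0 size ((2 : Int) ^ level)).flatMap (fun i =>
      (PySem.List.pyRange 0 size ((2 : Int) ^ level)).map (fun j =>
        PySem.Set.ofList ((PySem.List.pyRange i (min (i + (2 : Int) ^ level) size) 1).flatMap (fun x =>
          (PySem.List.pyRange j (min (j + (2 : Int) ^ level) size) 1).map (fun y =>
            xy_to_id_layout x y size layout)))))
    = pvBlocks size.toNat (2 ^ level) (pvG size layout) := by
  have hb : 0 < 2 ^ level := Nat.two_pow_pos level
  rw [show size = ((size.toNat : Nat) : Int) from (Int.toNat_of_nonneg (by omega)).symm]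
  rw [Int.toNat_natCast]
  rw [show ((2 : Int) ^ level) = ((2 ^ level : Nat) : Int) from by push_cast; rfl]
  rw [pvPyRange_step hb size.toNat, List.flatMap_map]
  unfold pvBlocks
  apply pvFlatMap_congr
  intro I hI
  rw [List.map_map]
  apply List.map_congr_left
  intro J hJ
  simp only [Function.comp]
  have hmin : ∀ K : Nat, ((K * 2 ^ level : Nat) : Int) + ((2 ^ level : Nat) : Int) = ((K * 2 ^ level + 2 ^ level : Nat) : Int) := by
    intro K; push_cast; ring
  rw [hmin I, hmin J, ← Nat.cast_min, ← Nat.cast_min, pvPyRange_one, pvPyRange_one,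
    List.flatMap_map]
  show PySem.Set.ofList _ = PySem.Set.ofList (pvCells size.toNat (2 ^ level) (pvG ((size.toNat : Nat) : Int) layout) I J)
  congr 1
  unfold pvCells pvChunk pvCs
  apply pvFlatMap_congr
  intro x hx
  rw [List.map_map]
  rfl

lemma pvStepA_eq {size : Int} (layout : Option (List Int)) (hsz : 1 ≤ size)
    (h : PySem.Dict (Int × Int) (List (List Int))) (level : Nat) :
    pvStepA size layout h level =
      (pvBlocks size.toNat (2 ^ level) (pvG size layout)).foldl
        (fun h nodes => h.modify ((level : Int), 2) [] (fun v => v ++ [nodes])) h := by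
  unfold pvStepA
  rw [← pvA_level layout hsz level]
  have hinner : ∀ (d : PySem.Dict (Int × Int) (List (List Int))) (i : Int),
      (PySem.List.pyRange 0 size ((2 : Int) ^ level)).foldl (fun h j =>
        h.modify ((level : Int), 2) [] (fun v => v ++
          [PySem.Set.ofList ((PySem.List.pyRange i (min (i + (2 : Int) ^ level) size) 1).flatMap (fun x =>
            (PySem.List.pyRange j (min (j + (2 : Int) ^ level) size) 1).map (fun y =>
              xy_to_id_layout x y size layout)))])) d =
      ((PySem.List.pyRange 0 size ((2 : Int) ^ level)).map (fun j =>
        PySem.Set.ofList ((PySem.List.pyRange i (min (i + (2 : Int) ^ level) size) 1).flatMap (fun x =>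
          (PySem.List.pyRange j (min (j + (2 : Int) ^ level) size) 1).map (fun y =>
            xy_to_id_layout x y size layout))))).foldl
        (fun h nodes => h.modify ((level : Int), 2) [] (fun v => v ++ [nodes])) d := by
    intro d i
    rw [List.foldl_map]
  simp only [hinner]
  rw [← List.foldl_flatMap]

lemma pvStepB_eq {size : Int} (layout : Option (List Int)) (hsz : 1 ≤ size)
    (h : PySem.Dict (Int × Int) (List (List Int))) (level : Nat) :
    pvStepB size layout h level =
      h.insert ((level : Int), 2) (pvBlocks size.toNat (2 ^ level) (pvG size layout)) := by
  have hb : 0 < 2 ^ level := Nat.two_pow_pos level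
  unfold pvStepB
  rw [← pvB_buckets hb (pvG size layout)]
  have hinner : ∀ (d : PySem.Dict (Int × Int) (List Int)) (x : Int),
      (PySem.List.pyRange 0 size 1).foldl (fun d y =>
        d.modify (PySem.Int.floordiv x ((1 : Int) <<< level), PySem.Int.floordiv y ((1 : Int) <<< level)) []
          (fun cells => cells ++ [pv_cell_value layout (x * size + y)])) d =
      ((PySem.List.pyRange 0 size 1).map (fun y =>
        (((PySem.Int.floordiv x ((1 : Int) <<< level), PySem.Int.floordiv y ((1 : Int) <<< level)) : Int × Int),
          pv_cell_value layout (x * size + y)))).foldl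
        (fun d p => d.modify p.1 [] (fun cells => cells ++ [p.2])) d := by
    intro d x
    rw [List.foldl_map]
  simp only [hinner]
  rw [← List.foldl_flatMap]
  have hlist : (PySem.List.pyRange 0 size 1).flatMap (fun x =>
      (PySem.List.pyRange 0 size 1).map (fun y =>
        (((PySem.Int.floordiv x ((1 : Int) <<< level), PySem.Int.floordiv y ((1 : Int) <<< level)) : Int × Int),
          pv_cell_value layout (x * size + y)))) = pvCP size.toNat (2 ^ level) (pvG size layout) := by
    unfold pvCP
    rw [show size = ((size.toNat : Nat) : Int) from (Int.toNat_of_nonneg (by omega)).symm, Int.toNat_natCast,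
      PySem.List.pyRange_zero_natCast, List.flatMap_map]
    apply pvFlatMap_congr
    intro x _
    rw [List.map_map]
    apply List.map_congr_left
    intro y _
    have hsh : ((1 : Int) <<< level) = ((2 ^ level : Nat) : Int) := by
      rw [Int.shiftLeft_eq, one_mul]; push_cast; rfl
    rw [hsh]
    simp only [Function.comp, PySem.Int.floordiv_natCast]
    rfl
  rw [hlist]

-- ---- assembling the hierarchy dict ----

lemma pvBlocks_ne_nil {n b' : Nat} (hn : 0 < n) (hb : 0 < b') (g : Nat → Nat → Int) :
    pvBlocks n b' g ≠ [] := by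
  have hm := pvM_pos hn hb
  apply List.ne_nil_of_length_pos
  unfold pvBlocks
  rw [List.length_flatMap]
  have h1 : (List.map (fun I => ((List.range (pvM n b')).map
      (fun J => PySem.Set.ofList (pvCells n b' g I J))).length) (List.range (pvM n b'))) =
      List.replicate (pvM n b') (pvM n b') := by
    rw [show (fun I => ((List.range (pvM n b')).map
        (fun J => PySem.Set.ofList (pvCells n b' g I J))).length) = (fun _ : Nat => pvM n b') from
      funext (fun I => by simp), List.map_const']
    simp
  rw [h1, List.sum_replicate, smul_eq_mul]
  positivity


lemma pvDict_append (bl : List (List Int)) (h : PySem.Dict (Int × Int) (List (List Int))) (K : Int × Int)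
    (hnd : h.keys.Nodup) (hc : h.contains K = false) (hne : bl ≠ []) :
    (bl.foldl (fun h nodes => h.modify K [] (fun v => v ++ [nodes])) h).items = h.items ++ [(K, bl)] := by
  have hKmem : K ∉ h.keys := fun hm => by
    rw [← PySem.Dict.contains_iff_mem_keys] at hm
    rw [hc] at hm
    cases hm
  have hgetD : ∀ c : Int × Int,
      (bl.foldl (fun h nodes => h.modify K [] (fun v => v ++ [nodes])) h).getD c [] =
        h.getD c [] ++ ((bl.map (fun v => (K, v))).filter (fun p => p.1 == c)).map (fun p => p.2) := by
    intro c
    rw [show bl.foldl (fun h nodes => h.modify K [] (fun v => v ++ [nodes])) h =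
        (bl.map (fun v => (K, v))).foldl (fun d p => d.modify p.1 [] (fun x => x ++ [p.2])) h from by
      rw [List.foldl_map]]
    exact PySem.Dict.getD_foldl_modify_append _ h c
  have hkeys : (bl.foldl (fun h nodes => h.modify K [] (fun v => v ++ [nodes])) h).keys =
      h.keys ++ [K] := by
    rw [PySem.Dict.keys_foldl_modify_key bl (fun _ => K) [] (fun _ nodes => (fun v => v ++ [nodes])) h]
    rw [List.map_const', pvUpdate_replicate (by
      cases bl with
      | nil => exact absurd rfl hne
      | cons a l => simp) hKmem]
  have hnd2 : (bl.foldl (fun h nodes => h.modify K [] (fun v => v ++ [nodes])) h).keys.Nodup :=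
    PySem.Dict.nodup_keys_foldl_modify_key bl (fun _ => K) [] (fun _ nodes => (fun v => v ++ [nodes])) h hnd
  rw [PySem.Dict.items_eq_map_keys _ hnd2 [], hkeys, List.map_append,
    PySem.Dict.items_eq_map_keys h hnd []]
  congr 1
  · apply List.map_congr_left
    intro k hk
    have hkne : ¬ (K == k) = true := by
      simp only [beq_iff_eq]
      intro hkk
      exact hKmem (hkk ▸ hk)
    rw [hgetD k, List.filter_eq_nil_iff.mpr, List.map_nil, List.append_nil]
    intro p hp
    obtain ⟨v, hv, rfl⟩ := List.mem_map.mp hp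
    exact hkne
  · rw [List.map_cons, List.map_nil, hgetD K, PySem.Dict.getD_of_not_contains h [] hc,
      List.nil_append, List.filter_eq_self.mpr, List.map_map]
    · rw [show (List.map ((fun p => p.2) ∘ fun v => (K, v)) bl) = bl from by
        rw [show ((fun (p : (Int × Int) × List Int) => p.2) ∘ fun v => (K, v)) = id from rfl, List.map_id]]
    · intro p hp
      obtain ⟨v, hv, rfl⟩ := List.mem_map.mp hp
      simp

lemma pvA_outer {size : Int} (layout : Option (List Int)) (hsz : 1 ≤ size) :
    ∀ L : Nat, ((List.range L).foldl (pvStepA size layout) PySem.Dict.empty).items =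
      (List.range L).map (fun (l : Nat) => (((l : Int), (2 : Int)), pvBlocks size.toNat (2 ^ l) (pvG size layout))) := by
  intro L
  induction L with
  | zero => rfl
  | succ L ih =>
    rw [List.range_succ, List.foldl_append, List.foldl_cons, List.foldl_nil,
      pvStepA_eq layout hsz _ L]
    have hkeys : ((List.range L).foldl (pvStepA size layout) PySem.Dict.empty).keys =
        (List.range L).map (fun (l : Nat) => (((l : Int), (2 : Int)) : Int × Int)) := by
      show ((List.range L).foldl (pvStepA size layout) PySem.Dict.empty).items.map (fun p => p.1) = _
      rw [ih, List.map_map]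
      rfl
    have hnd : ((List.range L).foldl (pvStepA size layout) PySem.Dict.empty).keys.Nodup := by
      rw [hkeys]
      refine List.Nodup.map ?_ List.nodup_range
      intro a b hab
      simpa using hab
    have hcont : ((List.range L).foldl (pvStepA size layout) PySem.Dict.empty).contains
        (((L : Int), (2 : Int))) = false := by
      rw [Bool.eq_false_iff]
      intro hcc
      rw [PySem.Dict.contains_iff_mem_keys, hkeys] at hcc
      obtain ⟨l, hl, hleq⟩ := List.mem_map.mp hcc
      rw [List.mem_range] at hl
      have : (l : Int) = (L : Int) := (Prod.mk.injEq _ _ _ _ ▸ hleq).1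
      omega
    rw [pvDict_append _ _ _ hnd hcont
      (pvBlocks_ne_nil (by omega) (Nat.two_pow_pos L) _), ih, List.map_append]
    rfl

lemma pvB_outer {size : Int} (layout : Option (List Int)) (hsz : 1 ≤ size) (L : Nat) :
    ((List.range L).foldl (pvStepB size layout) PySem.Dict.empty).items =
      (List.range L).map (fun (l : Nat) => (((l : Int), (2 : Int)), pvBlocks size.toNat (2 ^ l) (pvG size layout))) := by
  have hstep : pvStepB size layout = fun h (level : Nat) =>
      h.insert ((level : Int), 2) (pvBlocks size.toNat (2 ^ level) (pvG size layout)) :=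
    funext fun h => funext fun level => pvStepB_eq layout hsz h level
  rw [hstep, PySem.Dict.items_foldl_insert_fresh (List.range L)
    (fun (l : Nat) => (((l : Int), (2 : Int)) : Int × Int))
    (fun (l : Nat) => pvBlocks size.toNat (2 ^ l) (pvG size layout)) PySem.Dict.empty
    (fun a _ => PySem.Dict.contains_empty _) ?_]
  · rfl
  · refine List.Nodup.map ?_ List.nodup_range
    intro a b hab
    simpa using hab

-- ===== VERDICT (by name: the statement is the Claim_ definition above) =====
theorem generate_type1_submeshes_spec : Claim_equal_generate_type1_submeshes := by
  intro size layout _hdom hpre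
  unfold Spec_generate_type1_submeshes
  obtain ⟨hsz, -⟩ := hpre
  rw [pvPortA_eq, pvPortB_eq, pvA_outer layout hsz, pvB_outer layout hsz]
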